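-- pv_equiv track=rewrite | github.com/Migsej/vanderwaerden | main.py | has_arithmetic_progression
-- ===== SOURCE A (Python) =====
-- from itertools import permutations, combinations
--
-- def has_arithmetic_progression(group, k):
--     group.sort()
--     for i in list(combinations(group, k)):
--         step = i[1] - i[0]
--         for j in range(2, k):
--             if i[j] - i[j - 1] != step:
--                 break
--         else:
--             return True
--     return False
-- ===== SOURCE B (Python) =====
-- def has_arithmetic_progression(group, k):
--     # Any multiset AP of length k is either constant (a value occurring >= k times)
--     # or strictly increasing over k distinct values; check both with a hash set.
--     if k <= 1:
--         return len(group) >= k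
--     s = set(group)
--     if any(group.count(v) >= k for v in s):
--         return True
--     vals = sorted(s)
--     for i, a in enumerate(vals):
--         for b in vals[i + 1:]:
--             d = b - a
--             if all(a + j * d in s for j in range(2, k)):
--                 return True
--     return False
-- ===== Notes on version B (the rewrite author's own statement) =====
-- stated objective: faster
-- what changed: A sorts and scans all C(n,k) combinations for an arithmetic one; B uses a hash set: a value with multiplicity >= k gives a constant AP, otherwise it tries each pair of distinct sorted values as the first two terms and extends by membership tests.
import Mathlib
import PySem

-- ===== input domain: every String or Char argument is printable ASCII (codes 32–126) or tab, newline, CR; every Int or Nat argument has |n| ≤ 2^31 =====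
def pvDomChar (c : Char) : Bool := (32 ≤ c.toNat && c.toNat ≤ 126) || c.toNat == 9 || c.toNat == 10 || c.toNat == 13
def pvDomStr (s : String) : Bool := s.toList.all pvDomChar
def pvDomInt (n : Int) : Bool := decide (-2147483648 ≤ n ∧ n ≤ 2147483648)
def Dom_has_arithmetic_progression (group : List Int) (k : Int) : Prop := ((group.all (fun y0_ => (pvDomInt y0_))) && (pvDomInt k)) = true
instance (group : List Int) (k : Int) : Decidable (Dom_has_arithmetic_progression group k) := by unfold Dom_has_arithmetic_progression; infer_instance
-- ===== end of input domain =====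

-- B replaces A's scan of all C(n,k) sorted combinations by a hash-set check (a value with
-- multiplicity ≥ k, else extend each pair of distinct sorted values by membership tests);
-- A sorts `group` IN PLACE — the equivalence proved here is about the return value only.

-- ===== PORT A =====
-- `group.sort()` → PySem.List.sorted; `combinations(group, k)` → PySem.List.combinations (k.toNat:
-- Python raises ValueError for k < 0, outside Pre_); `i[1]`, `i[0]`, `i[j]` → pyGet? with `.getD 0`
-- exactly where Python would raise IndexError (only reachable for k ≤ 1, outside Pre_).
def has_arithmetic_progression (group : List Int) (k : Int) : Bool :=
  let g := PySem.List.sorted group (fun x => x)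
  (PySem.List.combinations g k.toNat).any (fun i =>
    let step := (PySem.List.pyGet? i 1).getD 0 - (PySem.List.pyGet? i 0).getD 0
    (PySem.List.pyRange 2 k).all (fun j =>
      ((PySem.List.pyGet? i j).getD 0 - (PySem.List.pyGet? i (j - 1)).getD 0) == step))

-- ===== PORT B =====
def has_arithmetic_progression_alt (group : List Int) (k : Int) : Bool :=
  if k ≤ 1 then decide (k ≤ (group.length : Int))
  else
    let s : PySem.Set Int := PySem.Set.ofList group
    if s.any (fun v => decide (k ≤ (PySem.List.count group v : Int))) then true
    else
      let vals := PySem.List.sorted s (fun x => x)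
      (PySem.List.enumerate vals).any (fun p =>
        (PySem.List.slice vals (some (p.1 + 1)) none).any (fun b =>
          let d := b - p.2
          (PySem.List.pyRange 2 k).all (fun j => PySem.Set.contains s (p.2 + j * d))))

-- ===== PRECONDITION & SPEC =====
-- Pre_ excludes exactly the inputs where A raises: k ≤ 0 (IndexError on the first k-tuple, or
-- ValueError for negative k) and k = 1 with a nonempty group (IndexError); A returns everywhere else.
def Pre_has_arithmetic_progression (group : List Int) (k : Int) : Prop :=
  2 ≤ k ∨ (k = 1 ∧ group = [])
instance (group : List Int) (k : Int) : Decidable (Pre_has_arithmetic_progression group k) := by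
  unfold Pre_has_arithmetic_progression; infer_instance
def pvWitness_has_arithmetic_progression : List Int × Int := ([3, 1, 7, 5], 3)
def Spec_has_arithmetic_progression (group : List Int) (k : Int) (out : Bool) : Prop := out = has_arithmetic_progression_alt group k
instance (group : List Int) (k : Int) (out : Bool) : Decidable (Spec_has_arithmetic_progression group k out) := by unfold Spec_has_arithmetic_progression; infer_instance

-- ===== CLAIM (what is proved, stated in full; the proofs are below) =====
def Claim_equal_has_arithmetic_progression : Prop := ∀ (group : List Int) (k : Int), Dom_has_arithmetic_progression group k → Pre_has_arithmetic_progression group k → Spec_has_arithmetic_progression group k (has_arithmetic_progression group k)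

-- ===== LEMMAS AND PROOFS =====

-- the common existence property both programs decide (for 2 ≤ k):
-- some value occurs ≥ k times, or a strictly increasing k-term AP lives in the set of values
def pvE (group : List Int) (k : Int) : Prop :=
  (∃ v ∈ group, k ≤ (group.count v : Int)) ∨
  (∃ a b : Int, a ∈ group ∧ b ∈ group ∧ a < b ∧
    ∀ j : Int, 2 ≤ j → j < k → a + j * (b - a) ∈ group)

-- a strictly increasing list whose elements all occur in a ≤-sorted list is a sublist of it
lemma pvSublist_of_pairwise_lt (l g : List Int) (hl : l.Pairwise (· < ·))
    (hg : g.Pairwise (· ≤ ·)) (hmem : ∀ x ∈ l, x ∈ g) : List.Sublist l g := by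
  induction g generalizing l with
  | nil =>
    cases l with
    | nil => exact List.Sublist.refl _
    | cons x t => exact absurd (hmem x (by simp)) (by simp)
  | cons h t ih =>
    cases l with
    | nil => exact List.nil_sublist _
    | cons x t' =>
      rcases List.pairwise_cons.mp hl with ⟨hxlt, hl'⟩
      by_cases hx : x = h
      · subst hx
        refine List.Sublist.cons₂ _ (ih t' hl' hg.tail ?_)
        intro y hy
        have hyg : y ∈ x :: t := hmem y (by simp [hy])
        rcases List.mem_cons.mp hyg with h1 | h1
        · exact absurd h1.symm (ne_of_lt (hxlt y hy))
        · exact h1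
      · refine List.Sublist.cons _ (ih (x :: t') hl hg.tail ?_)
        intro y hy
        have hyg : y ∈ h :: t := hmem y hy
        rcases List.mem_cons.mp hyg with h1 | h1
        · exfalso
          rcases List.mem_cons.mp hy with h2 | h2
          · exact hx (h2.symm.trans h1)
          · have hxg : x ∈ h :: t := hmem x (by simp)
            rcases List.mem_cons.mp hxg with h3 | h3
            · exact hx h3
            · have hle : h ≤ x := (List.pairwise_cons.mp hg).1 x h3
              have hlt : x < y := hxlt y h2
              omega
        · exact h1

-- A's inner check on a tuple, as a chain condition over Nat indices
lemma pvChk_iff (t : List Int) (k : Int) (h2 : 2 ≤ k) (hlen : t.length = k.toNat) (step : Int) :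
    ((PySem.List.pyRange 2 k).all (fun j =>
      ((PySem.List.pyGet? t j).getD 0 - (PySem.List.pyGet? t (j - 1)).getD 0) == step)) = true ↔
    (∀ m : Nat, 2 ≤ m → m < t.length → t[m]?.getD 0 - t[m - 1]?.getD 0 = step) := by
  rw [List.all_eq_true]
  constructor
  · intro hall m hm2 hmlt
    have hj := hall ((m : Nat) : Int) (PySem.List.mem_pyRange_one.mpr (by omega))
    rw [show ((m : Nat) : Int) - 1 = ((m - 1 : Nat) : Int) from by omega,
        PySem.List.pyGet?_natCast, PySem.List.pyGet?_natCast] at hj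
    simpa using hj
  · intro hch j hj
    rcases PySem.List.mem_pyRange_one.mp hj with ⟨hj2, hjk⟩
    rw [show j = ((j.toNat : Nat) : Int) from by omega,
        show ((j.toNat : Nat) : Int) - 1 = ((j.toNat - 1 : Nat) : Int) from by omega,
        PySem.List.pyGet?_natCast, PySem.List.pyGet?_natCast]
    simpa using hch j.toNat (by omega) (by omega)

-- a constant-difference chain has a closed form
lemma pvChain_closed (t : List Int) (step : Int)
    (hch : ∀ m : Nat, 2 ≤ m → m < t.length → t[m]?.getD 0 - t[m - 1]?.getD 0 = step)
    (hstep : t[1]?.getD 0 - t[0]?.getD 0 = step) :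
    ∀ m : Nat, m < t.length → t[m]?.getD 0 = t[0]?.getD 0 + m * step := by
  intro m
  induction m with
  | zero => intro _; simp
  | succ p ih =>
    intro hlt
    have hp := ih (by omega)
    by_cases hp0 : p = 0
    · subst hp0
      push_cast
      linear_combination hstep
    · have hc := hch (p + 1) (by omega) hlt
      simp only [Nat.add_sub_cancel] at hc
      push_cast
      linear_combination hp + hc

lemma pvA_iff (group : List Int) (k : Int) (h2 : 2 ≤ k) :
    has_arithmetic_progression group k = true ↔ pvE group k := by
  unfold has_arithmetic_progression
  rw [List.any_eq_true]
  have hgp : (PySem.List.sorted group (fun x => x)).Pairwise (· ≤ ·) :=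
    PySem.List.sorted_pairwise group (fun x => x)
  have hgm : ∀ x, x ∈ PySem.List.sorted group (fun x => x) ↔ x ∈ group :=
    fun x => PySem.List.mem_sorted group (fun x => x) false x
  have hgcnt : ∀ v : Int, (PySem.List.sorted group (fun x => x)).count v = group.count v :=
    fun v => (PySem.List.sorted_perm group (fun x => x) false).count_eq v
  have e1 : ∀ l : List Int, PySem.List.pyGet? l (1 : Int) = l[1]? := fun l => by
    have h := PySem.List.pyGet?_natCast l 1
    simpa using h
  have e0 : ∀ l : List Int, PySem.List.pyGet? l (0 : Int) = l[0]? := fun l => by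
    have h := PySem.List.pyGet?_natCast l 0
    simpa using h
  constructor
  · rintro ⟨t, htmem, hchk⟩
    rcases (PySem.List.mem_combinations_iff _ k.toNat t).mp htmem with ⟨hsub, hlen⟩
    have hlen2 : 2 ≤ t.length := by omega
    have hcmemg : ∀ x ∈ t, x ∈ group := fun x hx => (hgm x).mp (hsub.subset hx)
    have hcp : t.Pairwise (· ≤ ·) := List.Pairwise.sublist hsub hgp
    simp only at hchk
    rw [e1 t, e0 t] at hchk
    have hch := (pvChk_iff t k h2 hlen _).mp hchk
    have hclosed := pvChain_closed t _ hch rfl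
    have h0 : t[0]?.getD 0 = t[0]'(by omega) := by
      rw [List.getElem?_eq_getElem (by omega)]; rfl
    have h1 : t[1]?.getD 0 = t[1]'(by omega) := by
      rw [List.getElem?_eq_getElem (by omega)]; rfl
    have hamem : t[0]?.getD 0 ∈ group := by
      rw [h0]; exact hcmemg _ (List.getElem_mem _)
    have hbmem : t[1]?.getD 0 ∈ group := by
      rw [h1]; exact hcmemg _ (List.getElem_mem _)
    have hab : t[0]?.getD 0 ≤ t[1]?.getD 0 := by
      rw [h0, h1]
      exact List.pairwise_iff_getElem.mp hcp 0 1 (by omega) (by omega) (by omega)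
    rcases eq_or_lt_of_le hab with heq | hlt
    · -- constant tuple: its value occurs ≥ k times in group
      left
      refine ⟨t[0]?.getD 0, hamem, ?_⟩
      have hall : ∀ x ∈ t, t[0]?.getD 0 = x := by
        intro x hx
        rcases List.mem_iff_getElem.mp hx with ⟨m, hm, rfl⟩
        have hcm := hclosed m hm
        rw [List.getElem?_eq_getElem hm] at hcm
        simp only [Option.getD_some] at hcm
        rw [← heq] at hcm
        simp at hcm
        exact hcm.symm
      have hccnt : t.count (t[0]?.getD 0) = t.length := List.count_eq_length.mpr hall
      have hle := hsub.count_le (t[0]?.getD 0)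
      have hgc := hgcnt (t[0]?.getD 0)
      omega
    · -- strictly increasing tuple: its first two values start an AP over the value set
      right
      refine ⟨t[0]?.getD 0, t[1]?.getD 0, hamem, hbmem, hlt, ?_⟩
      intro j hj2 hjk
      have hm : j.toNat < t.length := by omega
      have hcm := hclosed j.toNat hm
      rw [List.getElem?_eq_getElem hm] at hcm
      simp only [Option.getD_some] at hcm
      rw [show ((j.toNat : Nat) : Int) = j from by omega] at hcm
      rw [← hcm]
      exact hcmemg _ (List.getElem_mem _)
  · intro hE
    rcases hE with ⟨v, hv, hcnt⟩ | ⟨a, b, ha, hb, hab, hj⟩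
    · -- v repeated k times is a combination that passes the check
      refine ⟨List.replicate k.toNat v, ?_, ?_⟩
      · rw [PySem.List.mem_combinations_iff]
        refine ⟨List.replicate_sublist_iff.mpr ?_, List.length_replicate⟩
        have hgc := hgcnt v
        omega
      · show ((PySem.List.pyRange 2 k).all (fun j =>
          ((PySem.List.pyGet? (List.replicate k.toNat v) j).getD 0 -
           (PySem.List.pyGet? (List.replicate k.toNat v) (j - 1)).getD 0) ==
          ((PySem.List.pyGet? (List.replicate k.toNat v) 1).getD 0 -
           (PySem.List.pyGet? (List.replicate k.toNat v) 0).getD 0))) = true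
        rw [e1 _, e0 _, pvChk_iff _ k h2 List.length_replicate]
        intro m hm2 hmlt
        rw [List.length_replicate] at hmlt
        simp only [List.getElem?_replicate, if_pos hmlt,
          if_pos (show m - 1 < k.toNat from by omega),
          if_pos (show 1 < k.toNat from by omega),
          if_pos (show 0 < k.toNat from by omega), Option.getD_some]
    · -- the AP a, a+d, a+2d, … with d = b - a is a strictly increasing combination
      have hd : (0 : Int) < b - a := by omega
      set w := (List.range k.toNat).map (fun m : Nat => a + (m : Int) * (b - a)) with hw
      have hwlen : w.length = k.toNat := by simp [hw]
      have hget : ∀ m : Nat, m < k.toNat → w[m]? = some (a + (m : Int) * (b - a)) := by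
        intro m hm
        rw [hw, List.getElem?_map, List.getElem?_range hm]; rfl
      have hmemg : ∀ x ∈ w, x ∈ group := by
        intro x hx
        rw [hw, List.mem_map] at hx
        rcases hx with ⟨m, hmr, rfl⟩
        rw [List.mem_range] at hmr
        match m, hmr with
        | 0, _ => simpa using ha
        | 1, _ => simpa using hb
        | (p + 2), hp =>
          have hp2 := hj ((p + 2 : Nat) : Int) (by push_cast; omega) (by omega)
          simpa using hp2
      refine ⟨w, ?_, ?_⟩
      · rw [PySem.List.mem_combinations_iff]
        refine ⟨pvSublist_of_pairwise_lt _ _ ?_ hgp (fun x hx => (hgm x).mpr (hmemg x hx)), hwlen⟩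
        rw [hw, List.pairwise_map]
        refine List.Pairwise.imp ?_ List.pairwise_lt_range
        intro p q hpq
        have hc : (p : Int) < (q : Int) := by exact_mod_cast hpq
        nlinarith
      · show ((PySem.List.pyRange 2 k).all (fun j =>
          ((PySem.List.pyGet? w j).getD 0 - (PySem.List.pyGet? w (j - 1)).getD 0) ==
          ((PySem.List.pyGet? w 1).getD 0 - (PySem.List.pyGet? w 0).getD 0))) = true
        rw [e1 w, e0 w, pvChk_iff w k h2 hwlen]
        intro m hm2 hmlt
        rw [hwlen] at hmlt
        rw [hget m hmlt, hget (m - 1) (by omega), hget 1 (by omega), hget 0 (by omega)]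
        simp only [Option.getD_some]
        rw [show ((m - 1 : Nat) : Int) = (m : Int) - 1 from by omega]
        ring

lemma pvB_iff (group : List Int) (k : Int) (h2 : 2 ≤ k) :
    has_arithmetic_progression_alt group k = true ↔ pvE group k := by
  unfold has_arithmetic_progression_alt
  rw [if_neg (by omega : ¬ k ≤ 1)]
  simp only
  have hsm : ∀ x : Int, x ∈ PySem.Set.ofList group ↔ x ∈ group :=
    fun x => PySem.Set.mem_ofList group x
  have hvp : (PySem.List.sorted (PySem.Set.ofList group) (fun x => x)).Pairwise (· < ·) :=
    PySem.List.sorted_ofList_pairwise_lt group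
  have hvm : ∀ x : Int, x ∈ PySem.List.sorted (PySem.Set.ofList group) (fun x => x) ↔ x ∈ group :=
    fun x => (PySem.List.mem_sorted _ (fun x => x) false x).trans (hsm x)
  by_cases hcnt : ((PySem.Set.ofList group).any
      (fun v => decide (k ≤ (PySem.List.count group v : Int)))) = true
  · rw [if_pos hcnt]
    simp only [true_iff]
    left
    rcases List.any_eq_true.mp hcnt with ⟨v, hvs, hvc⟩
    rw [PySem.List.count_eq] at hvc
    exact ⟨v, (hsm v).mp hvs, by simpa using hvc⟩
  · rw [if_neg hcnt]
    have hnocnt : ∀ v ∈ group, ¬ (k ≤ (group.count v : Int)) := by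
      intro v hvg hle
      exact hcnt (List.any_eq_true.mpr ⟨v, (hsm v).mpr hvg,
        by rw [PySem.List.count_eq]; simpa using hle⟩)
    rw [List.any_eq_true]
    constructor
    · rintro ⟨p, hp, hinner⟩
      rcases (PySem.List.mem_enumerate_iff _ 0 p).mp hp with ⟨i, hi, rfl⟩
      simp only [zero_add] at hinner
      rcases List.any_eq_true.mp hinner with ⟨b, hbmem, hball⟩
      rw [PySem.List.slice_from _ (by omega : (0:Int) ≤ (i : Int) + 1),
          show ((i : Int) + 1).toNat = i + 1 from by omega] at hbmem
      have hbv : b ∈ PySem.List.sorted (PySem.Set.ofList group) (fun x => x) :=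
        List.mem_of_mem_drop hbmem
      rcases List.mem_iff_getElem.mp hbmem with ⟨m, hm, hbm⟩
      have hmlen : i + 1 + m < (PySem.List.sorted (PySem.Set.ofList group) (fun x => x)).length := by
        rw [List.length_drop] at hm; omega
      have hblt : (PySem.List.sorted (PySem.Set.ofList group) (fun x => x))[i] < b := by
        rw [← hbm, List.getElem_drop]
        exact List.pairwise_iff_getElem.mp hvp i (i + 1 + m) hi hmlen (by omega)
      right
      refine ⟨_, b, (hvm _).mp (List.getElem_mem _), (hvm b).mp hbv, hblt, ?_⟩
      intro j hj2 hjk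
      have := List.all_eq_true.mp hball j (PySem.List.mem_pyRange_one.mpr ⟨hj2, hjk⟩)
      exact (hsm _).mp ((PySem.Set.contains_iff _ _).mp this)
    · intro hE
      rcases hE with ⟨v, hv, hcntv⟩ | ⟨a, b, ha, hb, hab, hj⟩
      · exact absurd hcntv (hnocnt v hv)
      · rcases List.mem_iff_getElem.mp ((hvm a).mpr ha) with ⟨i, hi, hia⟩
        rcases List.mem_iff_getElem.mp ((hvm b).mpr hb) with ⟨jb, hjb, hjbb⟩
        have hij : i < jb := by
          rcases lt_trichotomy i jb with h | h | h
          · exact h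
          · exfalso
            have : a = b := by rw [← hia, ← hjbb]; simp [h]
            omega
          · exfalso
            have := List.pairwise_iff_getElem.mp hvp jb i hjb hi h
            rw [hia, hjbb] at this; omega
        refine ⟨((i : Int), (PySem.List.sorted (PySem.Set.ofList group) (fun x => x))[i]),
          (PySem.List.mem_enumerate_iff _ 0 _).mpr ⟨i, hi, by simp⟩, ?_⟩
        dsimp only
        rw [List.any_eq_true]
        refine ⟨b, ?_, ?_⟩
        · rw [PySem.List.slice_from _ (by omega : (0:Int) ≤ (i : Int) + 1),
              show ((i : Int) + 1).toNat = i + 1 from by omega, List.mem_iff_getElem?]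
          refine ⟨jb - (i + 1), ?_⟩
          rw [List.getElem?_drop, show i + 1 + (jb - (i + 1)) = jb from by omega,
              List.getElem?_eq_getElem hjb, hjbb]
        · rw [List.all_eq_true]
          intro j hjr
          rcases PySem.List.mem_pyRange_one.mp hjr with ⟨hj2, hjk⟩
          rw [PySem.Set.contains_iff, hsm, hia]
          exact hj j hj2 hjk

-- ===== VERDICT (by name: the statement is the Claim_ definition above) =====
theorem has_arithmetic_progression_spec : Claim_equal_has_arithmetic_progression := by
  intro group k _ hpre
  unfold Spec_has_arithmetic_progression
  rcases hpre with h2 | ⟨hk, hg⟩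
  · exact Bool.coe_iff_coe.mp ((pvA_iff group k h2).trans (pvB_iff group k h2).symm)
  · subst hk; subst hg; decide
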